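-- pv_equiv track=rewrite | github.com/SLDYK/FVNT | Translation.py | _merge_ocr_lines
-- ===== SOURCE A (Python) =====
-- def _merge_ocr_lines(lines):
--     """合并 OCR 结果，默认跳过换行。
--     中文/日文等 CJK 文本直接拼接；拉丁文本之间补空格，避免单词粘连。"""
--     merged = []
--     previous = ""
--     for raw_line in lines:
--         line = raw_line.strip()
--         if not line:
--             continue
--         if not merged:
--             merged.append(line)
--             previous = line
--             continue
--
--         if _needs_space_between(previous, line):
--             merged.append(" ")
--         merged.append(line)
--         previous = line
--     return "".join(merged)
--
-- def _needs_space_between(left, right):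
--     left_char = left[-1]
--     right_char = right[0]
--     return left_char.isascii() and right_char.isascii() and (
--         left_char.isalnum() and right_char.isalnum()
--     )
-- ===== SOURCE B (Python) =====
-- def _needs_space_between(left, right):
--     left_char = left[-1]
--     right_char = right[0]
--     return left_char.isascii() and right_char.isascii() and (
--         left_char.isalnum() and right_char.isalnum()
--     )
--
-- def _merge_ocr_lines(lines):
--     # Right-to-left pass: scan the lines in reverse, building the output
--     # back-to-front; the state is the FIRST clean line of the suffix merged so
--     # far (needed for the boundary test), not the previous line as in a
--     # left-to-right merge.
--     merged = ""
--     first = None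
--     for raw in reversed(list(lines)):
--         head = raw.strip()
--         if not head:
--             continue
--         if first is None:
--             merged = head
--         else:
--             sep = " " if _needs_space_between(head, first) else ""
--             merged = head + sep + merged
--         first = head
--     return merged
-- ===== Notes on version B (the rewrite author's own statement) =====
-- stated objective: alternative
-- what changed: B traverses the lines in REVERSE and builds the merged string back-to-front, its loop state being the first clean line of the already-merged suffix, instead of A's forward loop appending pieces to a list while tracking the previous line.
import Mathlib
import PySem

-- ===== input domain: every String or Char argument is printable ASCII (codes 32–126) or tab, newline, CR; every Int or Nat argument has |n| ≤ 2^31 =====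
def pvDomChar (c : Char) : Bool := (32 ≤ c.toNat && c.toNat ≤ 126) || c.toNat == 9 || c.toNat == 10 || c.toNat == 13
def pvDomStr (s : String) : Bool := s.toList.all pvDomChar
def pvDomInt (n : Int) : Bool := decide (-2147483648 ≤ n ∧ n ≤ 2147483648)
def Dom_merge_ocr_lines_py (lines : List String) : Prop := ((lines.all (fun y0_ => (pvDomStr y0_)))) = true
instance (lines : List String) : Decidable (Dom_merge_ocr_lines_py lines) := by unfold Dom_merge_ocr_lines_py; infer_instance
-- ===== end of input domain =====

-- B scans the lines in REVERSE, building the merged string back-to-front while tracking the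
-- first clean line of the merged suffix, instead of A's forward loop tracking the previous
-- line; objective: an alternative traversal of the same cost.

-- ===== PORT A =====
-- _needs_space_between(left, right): left[-1]/right[0] via pyGet? (callers never pass "");
-- c.isascii() is ord(c) < 128, ported by hand (exact).
def pvNeedsSpace (left right : String) : Bool :=
  let left_char := (PySem.Str.pyGet? left (-1)).getD ' '
  let right_char := (PySem.Str.pyGet? right 0).getD ' '
  (left_char.toNat < 128) && (right_char.toNat < 128) &&
    (PySem.Chars.isalnum left_char && PySem.Chars.isalnum right_char)

def merge_ocr_lines_py (lines : List String) : String :=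
  let st := lines.foldl (fun (st : List String × String) raw_line =>
    let line := PySem.Str.strip raw_line
    if line = "" then st
    else if st.1 = [] then ([line], line)
    else if pvNeedsSpace st.2 line then (st.1 ++ [" ", line], line)
    else (st.1 ++ [line], line)) ([], "")
  PySem.Str.join "" st.1

-- ===== PORT B =====
def merge_ocr_lines_py_alt (lines : List String) : String :=
  (lines.reverse.foldl (fun (st : String × Option String) raw =>
    let head := PySem.Str.strip raw
    if head = "" then st
    else match st.2 with
      | none => (head, some head)
      | some f => (head ++ (if pvNeedsSpace head f then " " else "") ++ st.1, some head))
    ("", none)).1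

-- ===== PRECONDITION & SPEC =====
def Spec_merge_ocr_lines_py (lines : List String) (out : String) : Prop := out = merge_ocr_lines_py_alt lines
instance (lines : List String) (out : String) : Decidable (Spec_merge_ocr_lines_py lines out) := by unfold Spec_merge_ocr_lines_py; infer_instance

-- ===== CLAIM (what is proved, stated in full; the proofs are below) =====
def Claim_equal_merge_ocr_lines_py : Prop := ∀ (lines : List String), Dom_merge_ocr_lines_py lines → Spec_merge_ocr_lines_py lines (merge_ocr_lines_py lines)

-- ===== LEMMAS AND PROOFS =====

-- The merged tail after a clean line `prev`, over the list of following clean lines.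
def pvCat : String → List String → String
  | _, [] => ""
  | prev, c :: t => (if pvNeedsSpace prev c then " " else "") ++ c ++ pvCat c t

-- A's loop body once the empty-line skip has fired (line is already stripped, nonempty).
def pvStepA (st : List String × String) (line : String) : List String × String :=
  if st.1 = [] then ([line], line)
  else if pvNeedsSpace st.2 line then (st.1 ++ [" ", line], line)
  else (st.1 ++ [line], line)

-- B's loop body, as folded from the right over the original list.
def pvStepB (raw : String) (st : String × Option String) : String × Option String :=
  let head := PySem.Str.strip raw
  if head = "" then st
  else match st.2 with
    | none => (head, some head)
    | some f => (head ++ (if pvNeedsSpace head f then " " else "") ++ st.1, some head)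

-- Skipping blank lines in A's fold = folding over the filtered map.
lemma foldA_eq_filter (lines : List String) (st : List String × String) :
    lines.foldl (fun (st : List String × String) raw_line =>
      let line := PySem.Str.strip raw_line
      if line = "" then st
      else if st.1 = [] then ([line], line)
      else if pvNeedsSpace st.2 line then (st.1 ++ [" ", line], line)
      else (st.1 ++ [line], line)) st
    = ((lines.map PySem.Str.strip).filter (fun s => s ≠ "")).foldl pvStepA st := by
  induction lines generalizing st with
  | nil => rfl
  | cons raw rest ih =>
    simp only [List.map_cons, List.filter_cons, List.foldl_cons]
    by_cases h : PySem.Str.strip raw = ""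
    · simp [h, ih]
    · simp [h, ih, pvStepA]

lemma join_nil_append (l : List String) (x : String) :
    PySem.Str.join "" (l ++ [x]) = PySem.Str.join "" l ++ x := by
  induction l with
  | nil => simp [PySem.Str.join, PySem.Chars.join, List.intercalate]
  | cons a l ih =>
    cases l with
    | nil =>
      apply String.ext
      simp [PySem.Str.join, PySem.Chars.join, List.intercalate]
    | cons b l =>
      apply String.ext
      have := congrArg String.toList ih
      simp [PySem.Str.join, PySem.Chars.join, List.intercalate] at this ⊢
      simp [this]

lemma join_singleton (x : String) : PySem.Str.join "" [x] = x := by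
  apply String.ext; simp [PySem.Str.join, PySem.Chars.join, List.intercalate]

-- A's stateful fold over the clean tail, joined, is the prev-seeded tail concatenation.
lemma foldA_cat (t : List String) (merged : List String) (prev : String) (h : merged ≠ []) :
    PySem.Str.join "" ((t.foldl pvStepA (merged, prev)).1)
    = PySem.Str.join "" merged ++ pvCat prev t := by
  induction t generalizing merged prev with
  | nil => simp [pvCat]
  | cons c t ih =>
    simp only [List.foldl_cons]
    rw [show pvStepA (merged, prev) c =
        (if pvNeedsSpace prev c then (merged ++ [" ", c], c) else (merged ++ [c], c)) from by
      simp [pvStepA, h]]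
    by_cases hn : pvNeedsSpace prev c
    · rw [if_pos hn, ih _ _ (by simp)]
      have : PySem.Str.join "" (merged ++ [" ", c]) = PySem.Str.join "" merged ++ " " ++ c := by
        rw [show merged ++ [" ", c] = (merged ++ [" "]) ++ [c] by simp,
          join_nil_append, join_nil_append]
      simp [this, pvCat, hn, String.append_assoc]
    · rw [if_neg hn, ih _ _ (by simp)]
      simp [join_nil_append, pvCat, hn, String.append_assoc]

-- B's right fold, characterised by the clean-line list.
lemma foldB_clean (lines : List String) :
    lines.foldr pvStepB ("", none)
    = (match (lines.map PySem.Str.strip).filter (fun s => s ≠ "") with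
       | [] => (("" : String), (none : Option String))
       | h :: t => (h ++ pvCat h t, some h)) := by
  induction lines with
  | nil => rfl
  | cons raw rest ih =>
    simp only [List.foldr_cons, List.map_cons, List.filter_cons, ih]
    by_cases h : PySem.Str.strip raw = ""
    · simp [h, pvStepB]
    · simp only [h, decide_not, if_neg]
      cases hc : List.filter (fun s => !decide (s = "")) (List.map PySem.Str.strip rest) with
      | nil => simp [hc, pvStepB, h, pvCat]
      | cons c t => simp [hc, pvStepB, h, pvCat, String.append_assoc]

-- ===== VERDICT (by name: the statement is the Claim_ definition above) =====
theorem merge_ocr_lines_py_spec : Claim_equal_merge_ocr_lines_py := by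
  intro lines _
  unfold Spec_merge_ocr_lines_py merge_ocr_lines_py merge_ocr_lines_py_alt
  rw [foldA_eq_filter]
  rw [show (fun (st : String × Option String) raw =>
      let head := PySem.Str.strip raw
      if head = "" then st
      else match st.2 with
        | none => (head, some head)
        | some f => (head ++ (if pvNeedsSpace head f then " " else "") ++ st.1, some head))
    = (fun st raw => pvStepB raw st) from rfl]
  rw [List.foldl_reverse, foldB_clean]
  cases hc : (lines.map PySem.Str.strip).filter (fun s => s ≠ "") with
  | nil => simp [PySem.Str.join, PySem.Chars.join, List.intercalate]
  | cons h t =>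
    simp only [List.foldl_cons]
    rw [show pvStepA ([], "") h = ([h], h) from by simp [pvStepA]]
    rw [foldA_cat t [h] h (by simp), join_singleton]
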